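-- pv_equiv track=rewrite | github.com/ljbuturovic/muziqa | muziqa.py | _aggregate_decades
-- ===== SOURCE A (Python) =====
-- from collections import Counter, defaultdict
--
-- def _aggregate_decades(
--     years: Counter, year_artists: dict[str, set]
-- ) -> tuple[Counter, dict[str, int]]:
--     decades: Counter = Counter()
--     decade_artists: defaultdict[str, set] = defaultdict(set)
--     for year, count in years.items():
--         decade = year[:3] + "0s"
--         decades[decade] += count
--         decade_artists[decade] |= year_artists.get(year, set())
--     return decades, {d: len(s) for d, s in decade_artists.items()}
-- ===== SOURCE B (Python) =====
-- from collections import Counter, defaultdict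
--
-- def _aggregate_decades(years, year_artists):
--     # Two-pass: index the (year, count) items by decade first, then derive
--     # both outputs from the index (same values, same key order as the fused pass).
--     groups: defaultdict[str, list] = defaultdict(list)
--     for year, count in years.items():
--         groups[year[:3] + "0s"].append((year, count))
--     decades = Counter({d: sum(c for _, c in g) for d, g in groups.items()})
--     distinct = {
--         d: len(set().union(*(year_artists.get(y, set()) for y, _ in g)))
--         for d, g in groups.items()
--     }
--     return decades, distinct
-- ===== Notes on version B (the rewrite author's own statement) =====
-- stated objective: alternative
-- what changed: A's single fused loop that updates a Counter and a defaultdict(set) side by side is replaced by a two-pass decomposition: first build an index mapping each decade to its list of (year, count) items, then derive both outputs from that index (per-group sum for the Counter, size of the union of the group's artist sets for the distinct counts).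
import Mathlib
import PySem

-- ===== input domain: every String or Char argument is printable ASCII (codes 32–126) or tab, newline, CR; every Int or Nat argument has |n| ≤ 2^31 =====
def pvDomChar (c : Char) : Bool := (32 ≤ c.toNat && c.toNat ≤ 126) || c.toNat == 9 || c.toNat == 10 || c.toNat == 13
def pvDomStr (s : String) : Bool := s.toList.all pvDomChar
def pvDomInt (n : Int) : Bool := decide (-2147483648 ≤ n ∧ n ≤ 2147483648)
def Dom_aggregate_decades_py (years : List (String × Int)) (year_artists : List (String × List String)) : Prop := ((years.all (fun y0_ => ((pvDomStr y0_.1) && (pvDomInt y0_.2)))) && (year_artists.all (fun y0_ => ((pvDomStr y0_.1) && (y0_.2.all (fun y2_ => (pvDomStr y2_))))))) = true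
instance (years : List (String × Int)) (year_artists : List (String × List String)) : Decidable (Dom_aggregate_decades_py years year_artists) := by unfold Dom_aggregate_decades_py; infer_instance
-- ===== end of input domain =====

-- B reorganises the same aggregation as two passes — group the (year, count) items by decade,
-- then summarise each group — instead of A's fused single pass; same values, same key order.

-- ===== PORT A =====
-- A: one fused loop over years.items(), maintaining a Counter of decade totals and a
-- defaultdict(set) of decade artists side by side.
def aggregate_decades_py (years : List (String × Int)) (year_artists : List (String × List String)) : (List (String × Int)) × (List (String × Int)) :=
  let st := years.foldl
    (fun (st : PySem.Dict String Int × PySem.Dict String (PySem.Set String)) yc =>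
      let decade := String.mk (PySem.List.slice yc.1.toList none (some 3) ++ ['0', 's'])
      (st.1.modify decade 0 (fun v => v + yc.2),
       st.2.modify decade PySem.Set.empty
         (fun s => PySem.Set.union s ((PySem.Dict.mk year_artists).getD yc.1 PySem.Set.empty))))
    (PySem.Dict.empty, PySem.Dict.empty)
  (st.1.items, st.2.items.map (fun p => (p.1, PySem.Set.len p.2)))

-- ===== PORT B =====
-- B: first pass builds the decade → list of (year, count) index; the two outputs are then
-- mapped off that index (per-group sum, and size of the union of the group's artist sets).
def aggregate_decades_py_alt (years : List (String × Int)) (year_artists : List (String × List String)) : (List (String × Int)) × (List (String × Int)) :=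
  let groups := years.foldl
    (fun (g : PySem.Dict String (List (String × Int))) yc =>
      g.modify (String.mk (PySem.List.slice yc.1.toList none (some 3) ++ ['0', 's'])) [] (fun l => l ++ [yc]))
    PySem.Dict.empty
  (groups.items.map (fun p => (p.1, (p.2.map (fun q => q.2)).sum)),
   groups.items.map (fun p => (p.1,
     PySem.Set.len (p.2.foldl
       (fun s q => PySem.Set.union s ((PySem.Dict.mk year_artists).getD q.1 PySem.Set.empty))
       PySem.Set.empty))))

-- ===== PRECONDITION & SPEC =====
def Spec_aggregate_decades_py (years : List (String × Int)) (year_artists : List (String × List String)) (out : (List (String × Int)) × (List (String × Int))) : Prop := out = aggregate_decades_py_alt years year_artists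
instance (years : List (String × Int)) (year_artists : List (String × List String)) (out : (List (String × Int)) × (List (String × Int))) : Decidable (Spec_aggregate_decades_py years year_artists out) := by unfold Spec_aggregate_decades_py; infer_instance

-- ===== CLAIM (what is proved, stated in full; the proofs are below) =====
def Claim_equal_aggregate_decades_py : Prop := ∀ (years : List (String × Int)) (year_artists : List (String × List String)), Dom_aggregate_decades_py years year_artists → Spec_aggregate_decades_py years year_artists (aggregate_decades_py years year_artists)

-- ===== LEMMAS AND PROOFS =====

-- decade key year[:3] + "0s", shared spelling for the proofs
def pvDec (y : String) : String := String.mk (PySem.List.slice y.toList none (some 3) ++ ['0', 's'])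

-- value at key c after a modify-accumulate loop keyed by `key`: fold `op` over the matching items
theorem pv_getD_foldl_modify_op {κ ν γ : Type} [BEq κ] [LawfulBEq κ] [DecidableEq κ]
    (op : ν → γ → ν) (b0 : ν) (key : γ → κ) (l : List γ) (d : PySem.Dict κ ν) (c : κ) :
    (l.foldl (fun d x => d.modify (key x) b0 (fun v => op v x)) d).getD c b0
      = (l.filter (fun x => key x == c)).foldl op (d.getD c b0) := by
  induction l generalizing d with
  | nil => simp
  | cons x xs ih =>
    simp only [List.foldl_cons, List.filter_cons]
    rw [ih]
    by_cases h : key x = c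
    · simp [h, PySem.Dict.modify]
    · have hb : (key x == c) = false := by simpa using h
      have hne : c ≠ key x := fun hc => h hc.symm
      simp [hb, PySem.Dict.modify, PySem.Dict.getD_insert, hne]

-- ===== VERDICT (by name: the statement is the Claim_ definition above) =====
theorem aggregate_decades_py_spec : Claim_equal_aggregate_decades_py := by
  intro years year_artists _
  unfold Spec_aggregate_decades_py aggregate_decades_py aggregate_decades_py_alt
  -- split A's fused fold over the pair of dicts into its two component folds
  rw [show (fun (st : PySem.Dict String Int × PySem.Dict String (PySem.Set String)) (yc : String × Int) =>
        let decade := String.mk (PySem.List.slice yc.1.toList none (some 3) ++ ['0', 's'])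
        (st.1.modify decade 0 (fun v => v + yc.2),
         st.2.modify decade PySem.Set.empty
           (fun s => PySem.Set.union s ((PySem.Dict.mk year_artists).getD yc.1 PySem.Set.empty))))
      = (fun (st : PySem.Dict String Int × PySem.Dict String (PySem.Set String)) (yc : String × Int) =>
        ((fun (d : PySem.Dict String Int) (yc : String × Int) => d.modify (pvDec yc.1) 0 (fun v => v + yc.2)) st.1 yc,
         (fun (d : PySem.Dict String (PySem.Set String)) (yc : String × Int) => d.modify (pvDec yc.1) PySem.Set.empty
           (fun s => PySem.Set.union s ((PySem.Dict.mk year_artists).getD yc.1 PySem.Set.empty))) st.2 yc))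
      from rfl]
  rw [PySem.List.foldl_prod_mk
      (f := fun (d : PySem.Dict String Int) (yc : String × Int) => d.modify (pvDec yc.1) 0 (fun v => v + yc.2))
      (g := fun (d : PySem.Dict String (PySem.Set String)) (yc : String × Int) => d.modify (pvDec yc.1) PySem.Set.empty
        (fun s => PySem.Set.union s ((PySem.Dict.mk year_artists).getD yc.1 PySem.Set.empty)))]
  -- names for the three dicts
  set dA := years.foldl (fun (d : PySem.Dict String Int) yc => d.modify (pvDec yc.1) 0 (fun v => v + yc.2)) PySem.Dict.empty with hdA
  set sA := years.foldl (fun (d : PySem.Dict String (PySem.Set String)) yc => d.modify (pvDec yc.1) PySem.Set.empty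
      (fun s => PySem.Set.union s ((PySem.Dict.mk year_artists).getD yc.1 PySem.Set.empty))) PySem.Dict.empty with hsA
  have hgrp : (years.foldl
      (fun (g : PySem.Dict String (List (String × Int))) yc =>
        g.modify (String.mk (PySem.List.slice yc.1.toList none (some 3) ++ ['0', 's'])) [] (fun l => l ++ [yc]))
      PySem.Dict.empty)
      = years.foldl (fun (g : PySem.Dict String (List (String × Int))) yc =>
        g.modify (pvDec yc.1) [] (fun l => l ++ [yc])) PySem.Dict.empty := rfl
  rw [hgrp]
  set G := years.foldl (fun (g : PySem.Dict String (List (String × Int))) yc =>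
      g.modify (pvDec yc.1) [] (fun l => l ++ [yc])) PySem.Dict.empty with hG
  -- the three dicts share the same key list K, without duplicates
  have hkA : dA.keys = PySem.Set.update (PySem.Dict.empty : PySem.Dict String Int).keys (years.map (fun yc => pvDec yc.1)) :=
    PySem.Dict.keys_foldl_modify_key years (fun yc => pvDec yc.1) 0 (fun _ yc => fun v => v + yc.2) _
  have hkS : sA.keys = PySem.Set.update (PySem.Dict.empty : PySem.Dict String (PySem.Set String)).keys (years.map (fun yc => pvDec yc.1)) :=
    PySem.Dict.keys_foldl_modify_key years (fun yc => pvDec yc.1) PySem.Set.empty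
      (fun _ yc => fun s => PySem.Set.union s ((PySem.Dict.mk year_artists).getD yc.1 PySem.Set.empty)) _
  have hkG : G.keys = PySem.Set.update (PySem.Dict.empty : PySem.Dict String (List (String × Int))).keys (years.map (fun yc => pvDec yc.1)) :=
    PySem.Dict.keys_foldl_modify_key years (fun yc => pvDec yc.1) [] (fun _ yc => fun l => l ++ [yc]) _
  have hnA : dA.keys.Nodup :=
    PySem.Dict.nodup_keys_foldl_modify_key years (fun yc => pvDec yc.1) 0 (fun _ yc => fun v => v + yc.2) _ (by simp [PySem.Dict.empty, PySem.Dict.keys])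
  have hnS : sA.keys.Nodup :=
    PySem.Dict.nodup_keys_foldl_modify_key years (fun yc => pvDec yc.1) PySem.Set.empty
      (fun _ yc => fun s => PySem.Set.union s ((PySem.Dict.mk year_artists).getD yc.1 PySem.Set.empty)) _ (by simp [PySem.Dict.empty, PySem.Dict.keys])
  have hnG : G.keys.Nodup :=
    PySem.Dict.nodup_keys_foldl_modify_key years (fun yc => pvDec yc.1) [] (fun _ yc => fun l => l ++ [yc]) _ (by simp [PySem.Dict.empty, PySem.Dict.keys])
  -- per-key values, by the modify-accumulate lemma
  have hvA : ∀ k, dA.getD k 0 = (years.filter (fun yc => pvDec yc.1 == k)).foldl (fun v yc => v + yc.2) 0 := by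
    intro k
    have := pv_getD_foldl_modify_op (fun v (yc : String × Int) => v + yc.2) 0 (fun yc => pvDec yc.1) years PySem.Dict.empty k
    simpa [PySem.Dict.getD, PySem.Dict.get?, PySem.Dict.empty] using this
  have hvS : ∀ k, sA.getD k PySem.Set.empty = (years.filter (fun yc => pvDec yc.1 == k)).foldl
      (fun s yc => PySem.Set.union s ((PySem.Dict.mk year_artists).getD yc.1 PySem.Set.empty)) PySem.Set.empty := by
    intro k
    have := pv_getD_foldl_modify_op
      (fun s (yc : String × Int) => PySem.Set.union s ((PySem.Dict.mk year_artists).getD yc.1 PySem.Set.empty))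
      PySem.Set.empty (fun yc => pvDec yc.1) years PySem.Dict.empty k
    simpa [PySem.Dict.getD, PySem.Dict.get?, PySem.Dict.empty] using this
  have hvG : ∀ k, G.getD k [] = years.filter (fun yc => pvDec yc.1 == k) := by
    intro k
    have hflat : ∀ (l : List (String × Int)), (l.map (fun x => [x])).flatten = l := by
      intro l; induction l with
      | nil => simp
      | cons x xs ih => simp [ih]
    have := pv_getD_foldl_modify_op (fun (l : List (String × Int)) yc => l ++ [yc]) [] (fun yc => pvDec yc.1) years PySem.Dict.empty k
    simpa [PySem.Dict.getD, PySem.Dict.get?, PySem.Dict.empty, hflat] using this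
  -- write each items list over the common key list
  have hiA := PySem.Dict.items_eq_map_keys dA hnA 0
  have hiS := PySem.Dict.items_eq_map_keys sA hnS PySem.Set.empty
  have hiG := PySem.Dict.items_eq_map_keys G hnG []
  refine Prod.ext ?_ ?_
  · -- Counter component
    show dA.items = G.items.map (fun p => (p.1, (p.2.map (fun q => q.2)).sum))
    rw [hiA, hiG, List.map_map, hkA, hkG]
    refine List.map_congr_left ?_
    intro k _
    simp only [Function.comp, hvA, hvG]
    refine congrArg _ ?_
    rw [List.sum_eq_foldl, List.foldl_map]
  · -- distinct-artist-count component
    show sA.items.map (fun p => (p.1, PySem.Set.len p.2))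
        = G.items.map (fun p => (p.1, PySem.Set.len (p.2.foldl
            (fun s q => PySem.Set.union s ((PySem.Dict.mk year_artists).getD q.1 PySem.Set.empty)) PySem.Set.empty)))
    rw [hiS, hiG, List.map_map, List.map_map, hkS, hkG]
    refine List.map_congr_left ?_
    intro k _
    simp only [Function.comp, hvS, hvG]
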